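-- pv_equiv track=rewrite | github.com/pypi-data/pypi-mirror-348 | packages/fdq/fdq-0.0.7-py3-none-any.whl/fdq/fdqsubmit.py | recursive_dict_update
-- ===== SOURCE A (Python) =====
-- import copy
--
-- def recursive_dict_update(d_parent, d_child):
--     for key, value in d_child.items():
--         if (
--             isinstance(value, dict)
--             and key in d_parent
--             and isinstance(d_parent[key], dict)
--         ):
--             recursive_dict_update(d_parent[key], value)
--         else:
--             d_parent[key] = value
--
--     return copy.deepcopy(d_parent)
-- ===== SOURCE B (Python) =====
-- import copy
--
--
-- def _merge(d_parent, d_child):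
--     # Pure recursive merge: builds a fresh dict, never mutates either argument.
--     merged = {}
--     for key, value in d_parent.items():
--         other = d_child.get(key)
--         if isinstance(value, dict) and isinstance(other, dict):
--             merged[key] = _merge(value, other)
--         else:
--             merged[key] = d_child[key] if key in d_child else value
--     for key, value in d_child.items():
--         if key not in merged:
--             merged[key] = value
--     return merged
--
--
-- def recursive_dict_update(d_parent, d_child):
--     return copy.deepcopy(_merge(d_parent, d_child))
-- ===== Notes on version B (the rewrite author's own statement) =====
-- stated objective: alternative
-- what changed: B builds a fresh merged dict purely (map over parent entries merging matching child values, then append child-only keys) with a single top-level deepcopy, instead of A's in-place mutation loop over the child with a deepcopy at every recursion level; unlike A, B does not mutate d_parent (return value is identical).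
import Mathlib
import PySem

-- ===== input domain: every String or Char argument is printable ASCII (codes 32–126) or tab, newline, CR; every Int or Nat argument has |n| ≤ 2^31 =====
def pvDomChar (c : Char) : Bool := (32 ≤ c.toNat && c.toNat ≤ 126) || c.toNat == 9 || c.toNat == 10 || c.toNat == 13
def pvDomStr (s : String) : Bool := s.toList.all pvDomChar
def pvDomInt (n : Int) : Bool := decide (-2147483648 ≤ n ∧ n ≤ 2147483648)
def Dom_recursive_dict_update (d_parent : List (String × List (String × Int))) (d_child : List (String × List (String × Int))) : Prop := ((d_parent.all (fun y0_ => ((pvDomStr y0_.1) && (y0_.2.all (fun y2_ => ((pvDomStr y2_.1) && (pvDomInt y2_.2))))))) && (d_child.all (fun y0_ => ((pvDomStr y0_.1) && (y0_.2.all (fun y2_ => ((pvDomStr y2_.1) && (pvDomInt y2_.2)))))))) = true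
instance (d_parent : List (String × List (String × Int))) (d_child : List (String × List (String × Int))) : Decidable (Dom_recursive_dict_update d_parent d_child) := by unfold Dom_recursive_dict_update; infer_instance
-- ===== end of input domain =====

-- B replaces A's in-place child-loop mutation (with a deepcopy at every recursion level) by a pure
-- merge built key-by-key with one top-level deepcopy; return values are identical, but unlike A,
-- B does not mutate d_parent (the equivalence proved here is about the return value only).


-- Python dict primitives on the association-list representation (thin wrappers over PySem.Dict):
-- pvGet? d k = d.get(k) ('k in d' = isSome); pvSet d k v = 'd[k] = v' (overwrite keeps position, new keys append).
def pvGet? {α : Type} (d : List (String × α)) (k : String) : Option α := (PySem.Dict.mk d).get? k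
def pvSet {α : Type} (d : List (String × α)) (k : String) (v : α) : List (String × α) := ((PySem.Dict.mk d).insert k v).items

-- ===== PORT A =====
-- A loops over d_child mutating d_parent. At this type every value is a dict of ints, so A's guard
-- 'isinstance(value, dict) and key in d_parent and isinstance(d_parent[key], dict)' holds exactly
-- when the key is present in d_parent, and the recursive call on the int-valued inner dicts always
-- takes the else branch, i.e. it is the inner assignment loop; copy.deepcopy is the identity on
-- the returned value.
def recursive_dict_update (d_parent : List (String × List (String × Int))) (d_child : List (String × List (String × Int))) : List (String × List (String × Int)) :=
  d_child.foldl (fun acc kv =>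
    match pvGet? acc kv.1 with
    | some pv => pvSet acc kv.1 (kv.2.foldl (fun a iv => pvSet a iv.1 iv.2) pv)
    | none => pvSet acc kv.1 kv.2) d_parent

-- ===== PORT B =====
-- B's _merge builds a fresh dict: one entry per d_parent key (value merged with the matching
-- d_child value when present), then the d_child-only keys appended in child order; the generic
-- Python recursion is instantiated at the two levels of this type (inner level: values are ints,
-- never dicts, so the merged inner entry is 'd_child[k] if k in d_child else value').
def recursive_dict_update_alt (d_parent : List (String × List (String × Int))) (d_child : List (String × List (String × Int))) : List (String × List (String × Int)) :=
  (d_parent.map fun kv =>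
    match pvGet? d_child kv.1 with
    | some cv =>
        (kv.1, (kv.2.map fun iv => (iv.1, (pvGet? cv iv.1).getD iv.2))
               ++ cv.filter (fun iv => (pvGet? kv.2 iv.1).isNone))
    | none => kv)
  ++ d_child.filter (fun kv => (pvGet? d_parent kv.1).isNone)

-- ===== PRECONDITION & SPEC =====
-- Pre_ is the dict representation invariant: the association lists (outer and inner) carry no
-- duplicate keys. Python dicts cannot hold duplicate keys, so this excludes no input A accepts.
def Pre_recursive_dict_update (d_parent : List (String × List (String × Int))) (d_child : List (String × List (String × Int))) : Prop :=
  (d_parent.map Prod.fst).Nodup ∧ (d_child.map Prod.fst).Nodup ∧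
  (∀ kv ∈ d_parent, (kv.2.map Prod.fst).Nodup) ∧ (∀ kv ∈ d_child, (kv.2.map Prod.fst).Nodup)
instance (d_parent : List (String × List (String × Int))) (d_child : List (String × List (String × Int))) : Decidable (Pre_recursive_dict_update d_parent d_child) := by unfold Pre_recursive_dict_update; infer_instance

def pvWitness_recursive_dict_update : (List (String × List (String × Int))) × (List (String × List (String × Int))) :=
  ([("a", [("x", 1)]), ("b", [("y", 2)])], [("a", [("x", 7), ("z", 3)]), ("c", [])])

def Spec_recursive_dict_update (d_parent : List (String × List (String × Int))) (d_child : List (String × List (String × Int))) (out : List (String × List (String × Int))) : Prop := out = recursive_dict_update_alt d_parent d_child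
instance (d_parent : List (String × List (String × Int))) (d_child : List (String × List (String × Int))) (out : List (String × List (String × Int))) : Decidable (Spec_recursive_dict_update d_parent d_child out) := by unfold Spec_recursive_dict_update; infer_instance

-- ===== CLAIM (what is proved, stated in full; the proofs are below) =====
def Claim_equal_recursive_dict_update : Prop := ∀ (d_parent : List (String × List (String × Int))) (d_child : List (String × List (String × Int))), Dom_recursive_dict_update d_parent d_child → Pre_recursive_dict_update d_parent d_child → Spec_recursive_dict_update d_parent d_child (recursive_dict_update d_parent d_child)

-- ===== LEMMAS AND PROOFS =====

theorem pvGet?_none_iff {α : Type} (d : List (String × α)) (x : String) :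
    pvGet? d x = none ↔ x ∉ d.map Prod.fst := by
  simp [pvGet?, PySem.Dict.get?_eq_none_iff_not_mem_keys, PySem.Dict.keys]

theorem pvGet?_isNone_iff {α : Type} (d : List (String × α)) (x : String) :
    (pvGet? d x).isNone = true ↔ x ∉ d.map Prod.fst := by
  rw [Option.isNone_iff_eq_none, pvGet?_none_iff]

theorem mem_of_pvGet?_eq_some {α : Type} (d : List (String × α)) (k : String) (v : α)
    (h : pvGet? d k = some v) : (k, v) ∈ d := by
  have := PySem.Dict.mem_items_of_get?_eq_some (d := PySem.Dict.mk d) h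
  simpa [PySem.Dict.items] using this

theorem pvGet?_of_mem {α : Type} (d : List (String × α)) (k : String) (v : α)
    (hnd : (d.map Prod.fst).Nodup) (h : (k, v) ∈ d) : pvGet? d k = some v := by
  exact PySem.Dict.get?_of_mem_items (d := PySem.Dict.mk d) h (by simpa [PySem.Dict.keys] using hnd)

theorem pvGet?_cons {α : Type} (k x : String) (v : α) (d : List (String × α)) :
    pvGet? ((k, v) :: d) x = if k == x then some v else pvGet? d x := by
  simpa [pvGet?] using PySem.Dict.get?_mk_cons (k := k) (v := v) (rest := d) (x := x)

theorem pvSet_of_none {α : Type} (d : List (String × α)) (k : String) (v : α)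
    (h : pvGet? d k = none) : pvSet d k v = d ++ [(k, v)] := by
  have hc : (PySem.Dict.mk d).contains k = false := by
    rw [PySem.Dict.contains_eq_isSome_get?]; simp [pvGet?] at h; simp [h]
  rw [pvSet, PySem.Dict.items_insert_of_not_contains (h := hc)]

theorem pvSet_of_some {α : Type} (d : List (String × α)) (k : String) (v w : α)
    (h : pvGet? d k = some w) :
    pvSet d k v = d.map (fun q => if q.1 == k then (k, v) else q) := by
  have hc : (PySem.Dict.mk d).contains k = true := by
    rw [PySem.Dict.contains_eq_isSome_get?]; simp [pvGet?] at h; simp [h]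
  rw [pvSet, PySem.Dict.items_insert_of_contains (h := hc)]

theorem foldl_merge_eq {α : Type} (comb : α → α → α) :
    ∀ (c acc : List (String × α)), (c.map Prod.fst).Nodup → (acc.map Prod.fst).Nodup →
    c.foldl (fun acc kv =>
      match pvGet? acc kv.1 with
      | some pv => pvSet acc kv.1 (comb pv kv.2)
      | none => pvSet acc kv.1 kv.2) acc
    = (acc.map fun kv =>
        match pvGet? c kv.1 with
        | some cv => (kv.1, comb kv.2 cv)
        | none => kv)
      ++ c.filter (fun kv => (pvGet? acc kv.1).isNone) := by
  intro c
  induction c with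
  | nil =>
      intro acc _ _
      simp [pvGet?, PySem.Dict.get?]
  | cons hd cs ih =>
      obtain ⟨k, v⟩ := hd
      intro acc hc hacc
      simp only [List.map_cons] at hc
      have hkcs : k ∉ cs.map Prod.fst := (List.nodup_cons.mp hc).1
      have hcs : (cs.map Prod.fst).Nodup := (List.nodup_cons.mp hc).2
      have hgetcs : pvGet? cs k = none := (pvGet?_none_iff _ _).mpr hkcs
      rw [List.foldl_cons]
      cases h : pvGet? acc k with
      | none =>
          have hknacc : k ∉ acc.map Prod.fst := (pvGet?_none_iff _ _).mp h
          simp only []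
          rw [pvSet_of_none _ _ _ h]
          have hnd' : ((acc ++ [(k, v)]).map Prod.fst).Nodup := by
            simp only [List.map_append, List.map_cons, List.map_nil]
            simp [List.nodup_append, hacc]
            intro a x hax he
            exact hknacc (he ▸ List.mem_map_of_mem hax)
          rw [ih (acc ++ [(k, v)]) hcs hnd']
          -- map part
          have hmap : ∀ kv ∈ acc,
              (match pvGet? cs kv.1 with
               | some cv => (kv.1, comb kv.2 cv)
               | none => kv)
            = (match pvGet? ((k, v) :: cs) kv.1 with
               | some cv => (kv.1, comb kv.2 cv)
               | none => kv) := by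
            intro kv hkv
            have hne : k ≠ kv.1 := fun he => hknacc (he ▸ List.mem_map_of_mem hkv)
            rw [pvGet?_cons, if_neg (by simpa using hne)]
          have hfil : ∀ kv ∈ cs,
              (pvGet? (acc ++ [(k, v)]) kv.1).isNone = (pvGet? acc kv.1).isNone := by
            intro kv hkv
            have hne : kv.1 ≠ k := fun he => hkcs (he ▸ List.mem_map_of_mem hkv)
            rw [Bool.eq_iff_iff, pvGet?_isNone_iff, pvGet?_isNone_iff]
            simp [hne]
          rw [List.map_append, List.map_congr_left hmap, List.filter_congr hfil]
          have hhead : (match pvGet? cs k with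
               | some cv => ((k : String), comb v cv)
               | none => ((k : String), (v : α))) = (k, v) := by rw [hgetcs]
          simp only [List.map_cons, List.map_nil, hhead]
          rw [List.filter_cons]
          have : (pvGet? acc k).isNone = true := by simp [h]
          simp [this]
      | some pv =>
          simp only []
          rw [pvSet_of_some _ _ _ _ h]
          have hkeys : ((acc.map fun q => if q.1 == k then (k, comb pv v) else q).map Prod.fst)
              = acc.map Prod.fst := by
            rw [List.map_map]; apply List.map_congr_left; intro q _
            by_cases hq : q.1 = k <;> simp [hq]
          have hnd' : ((acc.map fun q => if q.1 == k then (k, comb pv v) else q).map Prod.fst).Nodup := by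
            rw [hkeys]; exact hacc
          rw [ih _ hcs hnd']
          rw [List.map_map]
          have hmap : ∀ kv ∈ acc,
              ((fun kv => match pvGet? cs kv.1 with
                 | some cv => (kv.1, comb kv.2 cv)
                 | none => kv) ∘ fun q => if q.1 == k then (k, comb pv v) else q) kv
            = (match pvGet? ((k, v) :: cs) kv.1 with
               | some cv => (kv.1, comb kv.2 cv)
               | none => kv) := by
            intro kv hkv
            by_cases hq : kv.1 = k
            · have h2 : pvGet? acc k = some kv.2 := by rw [← hq]; exact pvGet?_of_mem _ _ _ hacc (by simpa using hkv)
              have hv : kv.2 = pv := Option.some.inj (h2.symm.trans h)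
              simp only [Function.comp_apply]
              rw [if_pos (by simpa using hq), hq, pvGet?_cons]
              simp [hgetcs, hv]
            · simp only [Function.comp_apply, if_neg (show ¬(kv.1 == k) = true by simp only [beq_iff_eq]; exact hq)]
              have hne : (k == kv.1) = false := beq_eq_false_iff_ne.mpr (fun he => hq he.symm)
              rw [pvGet?_cons, hne]
              simp
          have hfil : ∀ kv ∈ cs,
              (pvGet? (acc.map fun q => if q.1 == k then (k, comb pv v) else q) kv.1).isNone
                = (pvGet? acc kv.1).isNone := by
            intro kv hkv
            rw [Bool.eq_iff_iff, pvGet?_isNone_iff, pvGet?_isNone_iff, hkeys]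
          rw [List.map_congr_left hmap, List.filter_congr hfil, List.filter_cons]
          have : (pvGet? acc k).isNone = false := by simp [h]
          simp [this]

theorem foldl_merge_eq' {α : Type} (comb : α → α → α)
    (f : List (String × α) → (String × α) → List (String × α))
    (hf : ∀ acc kv, f acc kv = match pvGet? acc kv.1 with
      | some pv => pvSet acc kv.1 (comb pv kv.2)
      | none => pvSet acc kv.1 kv.2)
    (c acc : List (String × α)) (hc : (c.map Prod.fst).Nodup) (hacc : (acc.map Prod.fst).Nodup) :
    c.foldl f acc
    = (acc.map fun kv =>
        match pvGet? c kv.1 with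
        | some cv => (kv.1, comb kv.2 cv)
        | none => kv)
      ++ c.filter (fun kv => (pvGet? acc kv.1).isNone) := by
  rw [funext fun acc => funext fun kv => hf acc kv]
  exact foldl_merge_eq comb c acc hc hacc
theorem ab_eq (p c : List (String × List (String × Int)))
    (h1 : (p.map Prod.fst).Nodup) (h2 : (c.map Prod.fst).Nodup)
    (h3 : ∀ kv ∈ p, (kv.2.map Prod.fst).Nodup) (h4 : ∀ kv ∈ c, (kv.2.map Prod.fst).Nodup) :
    recursive_dict_update p c = recursive_dict_update_alt p c := by
  unfold recursive_dict_update recursive_dict_update_alt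
  rw [foldl_merge_eq' (fun pv w => w.foldl (fun a iv => pvSet a iv.1 iv.2) pv) _
        (by intro acc kv; cases pvGet? acc kv.1 <;> rfl) c p h2 h1]
  congr 1
  apply List.map_congr_left
  intro kv hkv
  cases hcv : pvGet? c kv.1 with
  | none => rfl
  | some cv =>
      simp only
      have hcvnd : (cv.map Prod.fst).Nodup := h4 (kv.1, cv) (mem_of_pvGet?_eq_some _ _ _ hcv)
      have hkvnd : (kv.2.map Prod.fst).Nodup := h3 kv hkv
      rw [foldl_merge_eq' (fun (_ w : Int) => w) _
            (by intro a iv; cases pvGet? a iv.1 <;> rfl) cv kv.2 hcvnd hkvnd]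
      refine congrArg _ ?_
      congr 1
      apply List.map_congr_left
      intro iv _
      cases pvGet? cv iv.1 <;> simp

-- ===== VERDICT (by name: the statement is the Claim_ definition above) =====
theorem recursive_dict_update_spec : Claim_equal_recursive_dict_update := by
  intro p c _ hpre
  obtain ⟨h1, h2, h3, h4⟩ := hpre
  exact ab_eq p c h1 h2 h3 h4
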